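-- pv_equiv track=rewrite | github.com/mlbrnm/sadt_scheduling_capstone | artifacts/schedulingprototype/scheduling.py | instructor_section_eligibility
-- ===== SOURCE A (Python) =====
-- def instructor_section_eligibility(sections, instructor_qualifications):
--     instructor_courses = {} #dictionary to hold courses and the instructors who can teach those courses
--
--     # map instructors to courses
--     for instructor in instructor_qualifications:
--         course_id = instructor['course_id']
--         instructor_id = instructor['instructor_id']
--
--         if course_id not in instructor_courses:
--             instructor_courses[course_id] = []
--
--         instructor_courses[course_id].append(instructor_id)
--
--     section_eligibiity = {} # dictionary to map which instructors can teach each section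
--
--     for section in sections:
--         course_id = section['course_id']
--         section_id = section['id']
--
--         # list to hold the eligible instructors for the section in section_eligibility
--         eligible_instructors = instructor_courses.get(course_id, [])
--
--         # update the section_eligibility dictionary to map which instructors can teach which sections per section_id
--         section_eligibiity[section_id] = eligible_instructors
--
--     return section_eligibiity
-- ===== SOURCE B (Python) =====
-- def instructor_section_eligibility(sections, instructor_qualifications):
--     # Direct nested scan: no course->instructors index is built.
--     section_eligibility = {}
--     for section in sections:
--         eligible = []
--         for instructor in instructor_qualifications:
--             if instructor['course_id'] == section['course_id']:
--                 eligible.append(instructor['instructor_id'])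
--         section_eligibility[section['id']] = eligible
--     return section_eligibility
-- ===== Notes on version B (the rewrite author's own statement) =====
-- stated objective: simpler
-- what changed: B drops A's intermediate course->instructors dictionary and instead, for each section, scans instructor_qualifications directly collecting matching instructor_ids.
import Mathlib
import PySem

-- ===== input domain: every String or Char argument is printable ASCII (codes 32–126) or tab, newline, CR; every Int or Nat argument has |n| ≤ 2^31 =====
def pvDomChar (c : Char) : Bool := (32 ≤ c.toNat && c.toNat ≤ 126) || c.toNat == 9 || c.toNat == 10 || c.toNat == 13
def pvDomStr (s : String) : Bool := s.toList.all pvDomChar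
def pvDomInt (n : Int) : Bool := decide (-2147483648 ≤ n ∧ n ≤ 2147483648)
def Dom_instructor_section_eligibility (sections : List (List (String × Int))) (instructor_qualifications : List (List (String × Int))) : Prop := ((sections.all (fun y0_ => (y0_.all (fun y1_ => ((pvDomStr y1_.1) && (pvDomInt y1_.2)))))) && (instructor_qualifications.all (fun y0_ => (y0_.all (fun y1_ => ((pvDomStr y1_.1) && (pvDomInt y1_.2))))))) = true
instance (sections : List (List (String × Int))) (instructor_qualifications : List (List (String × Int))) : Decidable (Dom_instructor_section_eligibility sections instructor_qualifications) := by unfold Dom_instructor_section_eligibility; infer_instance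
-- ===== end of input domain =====

-- B replaces A's course->instructors index by a direct nested scan of instructor_qualifications
-- per section (simpler: no intermediate dictionary). Return-value equivalence only; neither mutates its arguments.

-- shared helper: python subscript d['k'] on an input row (first-match lookup; default never
-- reached under Pre_, which guarantees the key is present)
def pvGetKey (d : List (String × Int)) (k : String) : Int := (PySem.Dict.mk d).getD k 0

-- ===== PORT A =====
def instructor_section_eligibility (sections : List (List (String × Int))) (instructor_qualifications : List (List (String × Int))) : List (Int × List Int) :=
  let instructor_courses : PySem.Dict Int (List Int) :=
    instructor_qualifications.foldl (fun d inst =>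
      let course_id := pvGetKey inst "course_id"
      let instructor_id := pvGetKey inst "instructor_id"
      let d := if d.contains course_id then d else d.insert course_id []
      d.modify course_id [] (fun l => l ++ [instructor_id])) PySem.Dict.empty
  let section_eligibiity : PySem.Dict Int (List Int) :=
    sections.foldl (fun se sec =>
      let course_id := pvGetKey sec "course_id"
      let section_id := pvGetKey sec "id"
      se.insert section_id (instructor_courses.getD course_id [])) PySem.Dict.empty
  section_eligibiity.items

-- ===== PORT B =====
def instructor_section_eligibility_alt (sections : List (List (String × Int))) (instructor_qualifications : List (List (String × Int))) : List (Int × List Int) :=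
  (sections.foldl (fun res sec =>
      let eligible := instructor_qualifications.foldl (fun acc inst =>
        if pvGetKey inst "course_id" == pvGetKey sec "course_id" then
          acc ++ [pvGetKey inst "instructor_id"]
        else acc) []
      res.insert (pvGetKey sec "id") eligible)
    (PySem.Dict.empty : PySem.Dict Int (List Int))).items

-- ===== PRECONDITION & SPEC =====
-- Pre_ excludes exactly the inputs where Python A raises KeyError: a section row without
-- the keys 'course_id' and 'id', or a qualification row without 'course_id' and 'instructor_id'.
def Pre_instructor_section_eligibility (sections : List (List (String × Int))) (instructor_qualifications : List (List (String × Int))) : Prop :=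
  (sections.all (fun s => (PySem.Dict.mk s).contains "course_id" && (PySem.Dict.mk s).contains "id")
    && instructor_qualifications.all (fun q => (PySem.Dict.mk q).contains "course_id" && (PySem.Dict.mk q).contains "instructor_id")) = true
instance (sections : List (List (String × Int))) (instructor_qualifications : List (List (String × Int))) : Decidable (Pre_instructor_section_eligibility sections instructor_qualifications) := by unfold Pre_instructor_section_eligibility; infer_instance

def pvWitness_instructor_section_eligibility : (List (List (String × Int))) × (List (List (String × Int))) :=
  ([[("course_id", 1), ("id", 10)], [("course_id", 2), ("id", 11)]],
   [[("course_id", 1), ("instructor_id", 5)], [("course_id", 1), ("instructor_id", 6)]])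

def Spec_instructor_section_eligibility (sections : List (List (String × Int))) (instructor_qualifications : List (List (String × Int))) (out : List (Int × List Int)) : Prop := out = instructor_section_eligibility_alt sections instructor_qualifications
instance (sections : List (List (String × Int))) (instructor_qualifications : List (List (String × Int))) (out : List (Int × List Int)) : Decidable (Spec_instructor_section_eligibility sections instructor_qualifications out) := by unfold Spec_instructor_section_eligibility; infer_instance

-- ===== CLAIM (what is proved, stated in full; the proofs are below) =====
def Claim_equal_instructor_section_eligibility : Prop := ∀ (sections : List (List (String × Int))) (instructor_qualifications : List (List (String × Int))), Dom_instructor_section_eligibility sections instructor_qualifications → Pre_instructor_section_eligibility sections instructor_qualifications → Spec_instructor_section_eligibility sections instructor_qualifications (instructor_section_eligibility sections instructor_qualifications)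

-- ===== LEMMAS AND PROOFS =====

-- one step of A's index-building loop, at the getD level
lemma stepA_getD (d : PySem.Dict Int (List Int)) (cid iid k : Int) :
    (((if d.contains cid then d else d.insert cid []).modify cid [] (fun l => l ++ [iid])).getD k [])
      = (if cid == k then d.getD k [] ++ [iid] else d.getD k []) := by
  rw [PySem.Dict.getD_modify]
  by_cases hc : d.contains cid = true
  · rw [if_pos hc]
    by_cases h : k = cid
    · subst h; simp
    · have hbk : (cid == k) = false := beq_eq_false_iff_ne.mpr (fun hh => h hh.symm)
      rw [if_neg h, hbk, if_neg (by simp)]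
  · rw [if_neg hc]
    by_cases h : k = cid
    · subst h
      have hg : d.get? k = none := by
        rw [PySem.Dict.get?_eq_none_iff_contains]; simpa using hc
      rw [if_pos rfl, if_pos (by simp : (k == k) = true)]
      rw [PySem.Dict.getD_insert_self]
      simp [PySem.Dict.getD, hg]
    · have hbk : (cid == k) = false := beq_eq_false_iff_ne.mpr (fun hh => h hh.symm)
      rw [if_neg h, hbk, if_neg (by simp)]
      exact PySem.Dict.getD_insert_of_ne _ _ _ h

-- A's index-building fold, characterized by lookup: filter-and-map of the qualifications
lemma buildA_getD (quals : List (List (String × Int))) :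
    ∀ (d : PySem.Dict Int (List Int)) (k : Int),
    (quals.foldl (fun d inst =>
        let course_id := pvGetKey inst "course_id"
        let instructor_id := pvGetKey inst "instructor_id"
        let d := if d.contains course_id then d else d.insert course_id []
        d.modify course_id [] (fun l => l ++ [instructor_id])) d).getD k []
      = d.getD k [] ++ ((quals.filter (fun q => pvGetKey q "course_id" == k)).map
          (fun q => pvGetKey q "instructor_id")) := by
  induction quals with
  | nil => intro d k; simp
  | cons q rest ih =>
    intro d k
    simp only [List.foldl_cons, List.filter_cons]
    rw [ih]
    by_cases h : pvGetKey q "course_id" == k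
    · simp only [if_true, List.map_cons, stepA_getD, h, List.append_assoc, List.singleton_append]
    · simp only [h]
      rw [stepA_getD]
      simp [h]

theorem instructor_section_eligibility_spec_proof :
    ∀ (sections : List (List (String × Int))) (instructor_qualifications : List (List (String × Int))),
    instructor_section_eligibility sections instructor_qualifications
      = instructor_section_eligibility_alt sections instructor_qualifications := by
  intro sections quals
  unfold instructor_section_eligibility instructor_section_eligibility_alt
  simp only []
  congr 1
  apply PySem.List.foldl_congr_mem
  intro se sec _
  simp only [buildA_getD, PySem.Dict.getD_empty, List.nil_append,
    PySem.List.foldl_append_if, List.nil_append]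

-- ===== VERDICT (by name: the statement is the Claim_ definition above) =====
theorem instructor_section_eligibility_spec : Claim_equal_instructor_section_eligibility := by
  intro sections quals _ _
  exact instructor_section_eligibility_spec_proof sections quals
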